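-- pv_equiv track=rewrite | github.com/idiomaticrefactoring/IdiomatizationLLM | code/ours/loop_else/loop_else_code_instr_node.py | get_blocks_divide_if
-- ===== SOURCE A (Python) =====
-- def get_blocks_divide_if(code):
--     blocks = []
--     current_block = []
--     for line in code.split('\n'):
--         if line.strip() == '':
--             continue
--         if line[0] != ' ':
--             if current_block:
--                 blocks.append((' '.join(current_block[0].split()), '\n'.join(current_block[1:])))
--                 current_block = []
--             current_block.append(line)
--         else:
--             current_block.append(line)
--     if current_block:
--         blocks.append((' '.join(current_block[0].split()), '\n'.join(current_block[1:])))
--     return blocks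
-- ===== SOURCE B (Python) =====
-- def get_blocks_divide_if(code):
--     lines = [l for l in code.split('\n') if l.strip() != '']
--     return _chop(lines)
--
--
-- def _chop(lines):
--     if not lines:
--         return []
--     i = 1
--     while i < len(lines) and lines[i][0] == ' ':
--         i += 1
--     return [(' '.join(lines[0].split()), '\n'.join(lines[1:i]))] + _chop(lines[i:])
-- ===== Notes on version B (the rewrite author's own statement) =====
-- stated objective: simpler
-- what changed: Replaced the single accumulator-flush loop (blocks + current_block state) by three separate phases: filter out blank lines once, then recursively chop the filtered list at each unindented line into (header, body) blocks.
import Mathlib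
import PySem

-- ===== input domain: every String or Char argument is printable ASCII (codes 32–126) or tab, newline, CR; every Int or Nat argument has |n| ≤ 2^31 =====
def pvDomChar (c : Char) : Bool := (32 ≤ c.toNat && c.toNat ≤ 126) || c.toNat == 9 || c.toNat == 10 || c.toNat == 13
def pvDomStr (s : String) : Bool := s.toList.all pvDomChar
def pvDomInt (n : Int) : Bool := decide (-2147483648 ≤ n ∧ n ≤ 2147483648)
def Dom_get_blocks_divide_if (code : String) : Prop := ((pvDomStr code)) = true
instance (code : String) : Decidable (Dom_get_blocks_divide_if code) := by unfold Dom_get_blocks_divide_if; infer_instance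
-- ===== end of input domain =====

-- B replaces A's accumulator-flush loop by three phases (filter blanks, then recursively
-- chop at unindented lines); same output, chosen for simplicity, not speed.

-- ===== PORT A =====
-- 'if current_block: blocks.append((' '.join(cb[0].split()), '\n'.join(cb[1:])))'
def pvFlushA (blocks : List (String × String)) (cur : List String) : List (String × String) :=
  match cur with
  | [] => blocks
  | h :: t => blocks ++ [(PySem.Str.join " " (PySem.Str.split₀ h), PySem.Str.join "\n" t)]

-- one iteration of A's 'for line in code.split('\n')' loop, state = (blocks, current_block)
def pvStepA (st : List (String × String) × List String) (line : String) :
    List (String × String) × List String :=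
  if PySem.Str.strip line = "" then st
  else if PySem.Str.pyGet? line 0 ≠ some ' ' then (pvFlushA st.1 st.2, [line])
  else (st.1, st.2 ++ [line])

def get_blocks_divide_if (code : String) : List (String × String) :=
  let st := ((PySem.Str.split? code "\n").getD []).foldl pvStepA ([], [])
  pvFlushA st.1 st.2

-- ===== PORT B =====
def pvIndented (line : String) : Bool := PySem.Str.pyGet? line 0 == some ' '

-- Source B's _chop: inner while scans the indented body, recurse on the rest
def pvChop : List String → List (String × String)
  | [] => []
  | h :: t =>
      (PySem.Str.join " " (PySem.Str.split₀ h), PySem.Str.join "\n" (t.takeWhile pvIndented))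
        :: pvChop (t.dropWhile pvIndented)
termination_by ls => ls.length
decreasing_by simp only [List.length_cons]; exact Nat.lt_succ_of_le (List.length_dropWhile_le _ _)

def get_blocks_divide_if_alt (code : String) : List (String × String) :=
  pvChop (((PySem.Str.split? code "\n").getD []).filter (fun l => PySem.Str.strip l != ""))

-- ===== PRECONDITION & SPEC =====
def Spec_get_blocks_divide_if (code : String) (out : List (String × String)) : Prop := out = get_blocks_divide_if_alt code
instance (code : String) (out : List (String × String)) : Decidable (Spec_get_blocks_divide_if code out) := by unfold Spec_get_blocks_divide_if; infer_instance

-- ===== CLAIM (what is proved, stated in full; the proofs are below) =====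
def Claim_equal_get_blocks_divide_if : Prop := ∀ (code : String), Dom_get_blocks_divide_if code → Spec_get_blocks_divide_if code (get_blocks_divide_if code)

-- ===== LEMMAS AND PROOFS =====

theorem pvChop_cons (h : String) (t : List String) :
    pvChop (h :: t) =
      (PySem.Str.join " " (PySem.Str.split₀ h), PySem.Str.join "\n" (t.takeWhile pvIndented))
        :: pvChop (t.dropWhile pvIndented) := by
  rw [pvChop]

-- A's loop ignores blank lines, so folding over the filtered list is the same
theorem foldA_filter (lines : List String) (st : List (String × String) × List String) :
    lines.foldl pvStepA st =
      (lines.filter (fun l => PySem.Str.strip l != "")).foldl pvStepA st := by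
  induction lines generalizing st with
  | nil => rfl
  | cons l rest ih =>
      by_cases h : PySem.Str.strip l = ""
      · simp [h, List.foldl_cons, pvStepA, ih]
      · simp [h, List.foldl_cons, ih]

-- invariant of A's loop on blank-free lines, phrased against B's pvChop
theorem foldA_inv (lines : List String) (hnb : ∀ l ∈ lines, PySem.Str.strip l ≠ "")
    (blocks : List (String × String)) (hd : String) (t : List String) :
    pvFlushA (lines.foldl pvStepA (blocks, hd :: t)).1 (lines.foldl pvStepA (blocks, hd :: t)).2 =
      blocks ++ (PySem.Str.join " " (PySem.Str.split₀ hd),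
                 PySem.Str.join "\n" (t ++ lines.takeWhile pvIndented))
        :: pvChop (lines.dropWhile pvIndented) := by
  induction lines generalizing blocks hd t with
  | nil => simp [pvFlushA, pvChop]
  | cons l rest ih =>
      have hl : PySem.Str.strip l ≠ "" := hnb l (by simp)
      have hrest : ∀ x ∈ rest, PySem.Str.strip x ≠ "" := fun x hx => hnb x (by simp [hx])
      rw [List.foldl_cons]
      by_cases hc : PySem.Str.pyGet? l 0 = some ' '
      · have hind : pvIndented l = true := by simp [pvIndented]; simpa using hc
        have e1 : pvStepA (blocks, hd :: t) l = (blocks, hd :: (t ++ [l])) := by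
          unfold pvStepA
          rw [if_neg hl, if_neg (not_not.mpr hc)]
          rfl
        rw [e1, ih hrest blocks hd (t ++ [l])]
        simp [hind, List.append_assoc]
      · have hind : pvIndented l = false := by
          simp only [pvIndented, beq_eq_false_iff_ne, ne_eq]
          simpa using hc
        have e1 : pvStepA (blocks, hd :: t) l = (pvFlushA blocks (hd :: t), [l]) := by
          unfold pvStepA
          rw [if_neg hl, if_pos hc]
        rw [e1, ih hrest (pvFlushA blocks (hd :: t)) l []]
        simp [pvFlushA, hind, pvChop_cons]

-- ===== VERDICT (by name: the statement is the Claim_ definition above) =====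
theorem get_blocks_divide_if_spec : Claim_equal_get_blocks_divide_if := by
  intro code _
  show get_blocks_divide_if code = get_blocks_divide_if_alt code
  unfold get_blocks_divide_if get_blocks_divide_if_alt
  rw [foldA_filter]
  have hnb : ∀ l ∈ (((PySem.Str.split? code "\n").getD []).filter (fun l => PySem.Str.strip l != "")),
      PySem.Str.strip l ≠ "" := by
    intro l hl
    have := List.of_mem_filter hl
    simpa using this
  cases hFc : (((PySem.Str.split? code "\n").getD []).filter (fun l => PySem.Str.strip l != "")) with
  | nil => simp [pvFlushA, pvChop]
  | cons h t =>
      rw [hFc] at hnb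
      have hh : PySem.Str.strip h ≠ "" := hnb h (by simp)
      have ht : ∀ l ∈ t, PySem.Str.strip l ≠ "" := fun l hl => hnb l (by simp [hl])
      have hstep : pvStepA ([], []) h = ([], [h]) := by
        unfold pvStepA
        rw [if_neg hh]
        by_cases hc : PySem.Str.pyGet? h 0 = some ' '
        · rw [if_neg (not_not.mpr hc)]
          rfl
        · rw [if_pos hc]
          simp [pvFlushA]
      rw [List.foldl_cons, hstep, foldA_inv t ht [] h [], pvChop_cons]
      simp
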